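-- pv_equiv track=rewrite | github.com/liuhaoyuyh/youtu-graphrag-base | main.py | rerank_chunks_by_keywords
-- ===== SOURCE A (Python) =====
-- from typing import List
--
-- def rerank_chunks_by_keywords(chunks: List[str], question: str, top_k: int) -> List[str]:
--     """
--     Rerank chunks by keyword matching with the question
--
--     Args:
--         chunks: List of chunk contents
--         question: Original question
--         top_k: Number of top chunks to return
--
--     Returns:
--         Reranked list of chunks
--     """
--     if len(chunks) <= top_k:
--         return chunks
--
--     question_keywords = set(question.lower().split())
--     scored_chunks = []
--
--     for chunk in chunks:
--         chunk_lower = chunk.lower()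
--         score = sum(1 for keyword in question_keywords if keyword in chunk_lower)
--         scored_chunks.append((chunk, score))
--
--     scored_chunks.sort(key=lambda x: x[1], reverse=True)
--
--     return [scored_chunk[0] for scored_chunk in scored_chunks[:top_k]]
-- ===== SOURCE B (Python) =====
-- from typing import List
--
-- def rerank_chunks_by_keywords(chunks: List[str], question: str, top_k: int) -> List[str]:
--     """Rerank by keyword overlap without sorting: precompute every chunk's
--     score, then sweep the possible scores from highest to lowest, emitting the
--     chunks of each score in their original order, and cut at top_k."""
--     if len(chunks) <= top_k:
--         return chunks
--
--     keywords = set(question.lower().split())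
--     scores = [len([kw for kw in keywords if kw in c.lower()]) for c in chunks]
--
--     result = []
--     for s in range(len(keywords), -1, -1):
--         result += [c for c, sc in zip(chunks, scores) if sc == s]
--
--     return result[:top_k]
-- ===== Notes on version B (the rewrite author's own statement) =====
-- stated objective: alternative
-- what changed: The stable comparison sort of (chunk, score) pairs is replaced by a sort-free distribution pass: scores are precomputed once, then the possible score values are swept from highest to lowest and the chunks of each score are emitted in original order, which reproduces the reverse-stable order exactly.
import Mathlib
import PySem

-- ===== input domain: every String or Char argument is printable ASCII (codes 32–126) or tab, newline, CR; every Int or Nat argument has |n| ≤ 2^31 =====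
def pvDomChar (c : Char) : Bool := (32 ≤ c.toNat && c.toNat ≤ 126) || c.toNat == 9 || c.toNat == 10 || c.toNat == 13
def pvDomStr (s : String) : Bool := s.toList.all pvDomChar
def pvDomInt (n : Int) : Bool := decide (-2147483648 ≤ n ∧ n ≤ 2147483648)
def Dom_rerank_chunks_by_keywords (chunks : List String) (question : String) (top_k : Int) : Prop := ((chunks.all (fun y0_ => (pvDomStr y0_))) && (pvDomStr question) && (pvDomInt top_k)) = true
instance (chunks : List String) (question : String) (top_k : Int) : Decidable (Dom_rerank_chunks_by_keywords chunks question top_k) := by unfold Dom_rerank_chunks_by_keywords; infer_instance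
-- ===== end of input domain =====

-- B replaces the stable comparison sort of (chunk, score) pairs by a sort-free
-- distribution pass: sweep scores from highest to lowest, emitting the chunks of
-- each score in original order (same cost class; the scoring pass dominates).

-- ===== PORT A =====
def rerank_chunks_by_keywords (chunks : List String) (question : String) (top_k : Int) : List String :=
  if (chunks.length : Int) ≤ top_k then chunks
  else
    let question_keywords : PySem.Set String :=
      PySem.Set.ofList (PySem.Str.split₀ (PySem.Str.lower question))
    let scored_chunks : List (String × Int) :=
      chunks.foldl (fun acc chunk =>
        let chunk_lower := PySem.Str.lower chunk
        acc ++ [(chunk,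
          ((question_keywords.filter (fun keyword => PySem.Str.isIn keyword chunk_lower)).map
            (fun _ => (1 : Int))).sum)]) []
    let sorted_chunks := PySem.List.sorted scored_chunks (fun x => x.2) true
    (PySem.List.slice sorted_chunks none (some top_k)).map (fun scored_chunk => scored_chunk.1)

-- ===== PORT B =====
def rerank_chunks_by_keywords_alt (chunks : List String) (question : String) (top_k : Int) : List String :=
  if (chunks.length : Int) ≤ top_k then chunks
  else
    let keywords : PySem.Set String :=
      PySem.Set.ofList (PySem.Str.split₀ (PySem.Str.lower question))
    let scores : List Int :=
      chunks.map (fun c =>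
        ((keywords.filter (fun kw => PySem.Str.isIn kw (PySem.Str.lower c))).length : Int))
    let result :=
      (PySem.List.pyRange (keywords.length : Int) (-1) (-1)).foldl
        (fun result s =>
          result ++ ((chunks.zip scores).filter (fun p => p.2 == s)).map (fun p => p.1)) []
    PySem.List.slice result none (some top_k)

-- ===== PRECONDITION & SPEC =====
def Spec_rerank_chunks_by_keywords (chunks : List String) (question : String) (top_k : Int) (out : List String) : Prop := out = rerank_chunks_by_keywords_alt chunks question top_k
instance (chunks : List String) (question : String) (top_k : Int) (out : List String) : Decidable (Spec_rerank_chunks_by_keywords chunks question top_k out) := by unfold Spec_rerank_chunks_by_keywords; infer_instance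

-- ===== CLAIM (what is proved, stated in full; the proofs are below) =====
def Claim_equal_rerank_chunks_by_keywords : Prop := ∀ (chunks : List String) (question : String) (top_k : Int), Dom_rerank_chunks_by_keywords chunks question top_k → Spec_rerank_chunks_by_keywords chunks question top_k (rerank_chunks_by_keywords chunks question top_k)

-- ===== LEMMAS AND PROOFS =====

theorem pv_insertBy_append {α : Type} (before : α → α → Bool) (x : α) (l m : List α)
    (h : ∀ y ∈ l, before x y = false) :
    PySem.List.insertBy before x (l ++ m) = l ++ PySem.List.insertBy before x m := by
  induction l with
  | nil => simp
  | cons a t ih =>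
    simp only [List.cons_append, PySem.List.insertBy]
    rw [h a (by simp)]
    simp [ih (fun y hy => h y (by simp [hy]))]

theorem pv_insertBy_front {α : Type} (before : α → α → Bool) (x : α) (m : List α)
    (h : ∀ y ∈ m, before x y = true) :
    PySem.List.insertBy before x m = x :: m := by
  cases m with
  | nil => simp [PySem.List.insertBy]
  | cons a t => simp [PySem.List.insertBy, h a (by simp)]

theorem pv_ins {α : Type} (key : α → Int) (ds : List Int) (hds : ds.Pairwise (· > ·))
    (x : α) (hx : key x ∈ ds) (ys : List α) :
    PySem.List.insertBy (fun a b => decide (key b < key a)) x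
      (ds.flatMap (fun s => ys.filter (fun p => key p == s)))
    = ds.flatMap (fun s => (ys ++ [x]).filter (fun p => key p == s)) := by
  induction ds with
  | nil => simp at hx
  | cons s0 rest ih =>
    have hrest : ∀ s ∈ rest, s < s0 := (List.pairwise_cons.mp hds).1
    simp only [List.flatMap_cons]
    by_cases hxe : key x = s0
    · have hnot : ∀ y ∈ ys.filter (fun p => key p == s0),
          (fun a b => decide (key b < key a)) x y = false := by
        intro y hy
        have h2 := (List.mem_filter.mp hy).2
        simp only [beq_iff_eq] at h2
        simp [h2, hxe]
      rw [pv_insertBy_append _ _ _ _ hnot]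
      have hall : ∀ y ∈ rest.flatMap (fun s => ys.filter (fun p => key p == s)),
          (fun a b => decide (key b < key a)) x y = true := by
        intro y hy
        obtain ⟨s, hs, hy'⟩ := List.mem_flatMap.mp hy
        have h2 := (List.mem_filter.mp hy').2
        simp only [beq_iff_eq] at h2
        have := hrest s hs
        simp; omega
      rw [pv_insertBy_front _ _ _ hall]
      have hxnr : rest.flatMap (fun s => (ys ++ [x]).filter (fun p => key p == s))
          = rest.flatMap (fun s => ys.filter (fun p => key p == s)) := by
        apply List.flatMap_congr
        intro s hs
        have hne : key x ≠ s := by have := hrest s hs; omega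
        simp [List.filter_append, hne]
      rw [hxnr]
      simp [List.filter_append, hxe]
    · have hx' : key x ∈ rest := by
        rcases List.mem_cons.mp hx with h | h
        · exact absurd h hxe
        · exact h
      have hxlt : key x < s0 := hrest _ hx'
      have hnot : ∀ y ∈ ys.filter (fun p => key p == s0),
          (fun a b => decide (key b < key a)) x y = false := by
        intro y hy
        have h2 := (List.mem_filter.mp hy).2
        simp only [beq_iff_eq] at h2
        simp [h2]; omega
      rw [pv_insertBy_append _ _ _ _ hnot]
      rw [ih (List.pairwise_cons.mp hds).2 hx']
      have : (ys ++ [x]).filter (fun p => key p == s0) = ys.filter (fun p => key p == s0) := by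
        simp [List.filter_append, hxe]
      rw [this]

theorem pv_sorted_buckets {α : Type} (key : α → Int) (ds : List Int) (hds : ds.Pairwise (· > ·))
    (xs : List α) (hxs : ∀ p ∈ xs, key p ∈ ds) :
    PySem.List.sorted xs (fun p => key p) true = ds.flatMap (fun s => xs.filter (fun p => key p == s)) := by
  rw [PySem.List.sorted_rev_eq_foldl_insertBy]
  induction xs using List.reverseRecOn with
  | nil => simp
  | append_singleton ys x ih =>
    rw [List.foldl_append]
    simp only [List.foldl_cons, List.foldl_nil]
    rw [ih (fun p hp => hxs p (by simp [hp]))]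
    exact pv_ins key ds hds x (hxs x (by simp)) ys

-- a generator-sum of 1s is the filtered length
theorem pv_sum_ones {α : Type} (l : List α) :
    ((l.map (fun _ => (1 : Int))).sum) = (l.length : Int) := by
  induction l with
  | nil => simp
  | cons a t ih =>
    simp only [List.map_cons, List.sum_cons, List.length_cons, ih]
    push_cast; omega

theorem pv_zip_map {α β : Type} (f : α → β) (l : List α) :
    l.zip (l.map f) = l.map (fun x => (x, f x)) := by
  induction l with
  | nil => rfl
  | cons a t ih => simp [ih]

-- xs[:b] commutes with map (the clamp depends only on the length)
theorem pv_map_slice {α β : Type} (f : α → β) (l : List α) (b : Int) :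
    (PySem.List.slice l none (some b)).map f = PySem.List.slice (l.map f) none (some b) := by
  simp [PySem.List.slice, List.map_take]

theorem pv_key (chunks : List String) (top_k : Int) (kws : PySem.Set String) :
    (PySem.List.slice (PySem.List.sorted
        (chunks.foldl (fun acc chunk =>
          let chunk_lower := PySem.Str.lower chunk
          acc ++ [(chunk,
            ((kws.filter (fun keyword => PySem.Str.isIn keyword chunk_lower)).map
              (fun _ => (1 : Int))).sum)]) [])
        (fun x => x.2) true) none (some top_k)).map (fun scored_chunk => scored_chunk.1)
    = PySem.List.slice
        ((PySem.List.pyRange (kws.length : Int) (-1) (-1)).foldl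
          (fun result s =>
            result ++ ((chunks.zip (chunks.map (fun c =>
              ((kws.filter (fun kw => PySem.Str.isIn kw (PySem.Str.lower c))).length : Int)))).filter
                (fun p => p.2 == s)).map (fun p => p.1)) [])
        none (some top_k) := by
  have hsum : ∀ c : String,
      ((kws.filter (fun keyword => PySem.Str.isIn keyword (PySem.Str.lower c))).map
        (fun _ => (1 : Int))).sum
      = ((kws.filter (fun kw => PySem.Str.isIn kw (PySem.Str.lower c))).length : Int) :=
    fun c => pv_sum_ones _
  set f : String → Int :=
    fun c => ((kws.filter (fun kw => PySem.Str.isIn kw (PySem.Str.lower c))).length : Int) with hf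
  have hle : ∀ c, f c ≤ (kws.length : Int) := by
    intro c
    simp only [hf]
    exact_mod_cast List.length_filter_le (fun kw => PySem.Str.isIn kw (PySem.Str.lower c)) kws
  have hnn : ∀ c, 0 ≤ f c := fun c => by simp only [hf]; positivity
  set ds : List Int := (List.range (kws.length + 1)).map (fun k : Nat => (kws.length : Int) - (k : Int)) with hdsdef
  have hds : ds.Pairwise (· > ·) := by
    rw [hdsdef, List.pairwise_map]
    exact List.pairwise_lt_range.imp (by intro a b h; omega)
  -- A side
  rw [PySem.List.foldl_append_singleton_eq_map (fun chunk => (chunk,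
    ((kws.filter (fun keyword => PySem.Str.isIn keyword (PySem.Str.lower chunk))).map
      (fun _ => (1 : Int))).sum))]
  rw [List.nil_append]
  have hmapf : chunks.map (fun chunk => (chunk,
      ((kws.filter (fun keyword => PySem.Str.isIn keyword (PySem.Str.lower chunk))).map
        (fun _ => (1 : Int))).sum)) = chunks.map (fun c => (c, f c)) := by
    apply List.map_congr_left
    intro c _
    rw [hsum c]
  rw [hmapf]
  have hmem : ∀ c : String, f c ∈ ds := by
    intro c
    have h1 := hnn c
    have h2 := hle c
    rw [hdsdef]
    refine List.mem_map.mpr ⟨((kws.length : Int) - f c).toNat, List.mem_range.mpr ?_, ?_⟩ <;> omega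
  rw [pv_sorted_buckets (fun p : String × Int => p.2) ds hds _
      (by
        intro p hp
        obtain ⟨c, hc, rfl⟩ := List.mem_map.mp hp
        exact hmem c)]
  rw [pv_map_slice]
  -- B side
  rw [PySem.List.foldl_append_eq_flatMap
    (fun s => ((chunks.zip (chunks.map f)).filter (fun p => p.2 == s)).map (fun p => p.1))]
  rw [List.nil_append, pv_zip_map]
  have hcnt : ((kws.length : Int) - (-1)).toNat = kws.length + 1 := by omega
  rw [show PySem.List.pyRange (kws.length : Int) (-1) (-1) = ds from by
    rw [PySem.List.pyRange_neg_one, hcnt, hdsdef]]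
  congr 1
  rw [List.map_flatMap]

theorem pv_main (chunks : List String) (question : String) (top_k : Int) :
    rerank_chunks_by_keywords chunks question top_k = rerank_chunks_by_keywords_alt chunks question top_k := by
  by_cases hg : (chunks.length : Int) ≤ top_k
  · simp [rerank_chunks_by_keywords, rerank_chunks_by_keywords_alt, hg]
  · simp only [rerank_chunks_by_keywords, rerank_chunks_by_keywords_alt, if_neg hg]
    exact pv_key chunks top_k _

-- ===== VERDICT (by name: the statement is the Claim_ definition above) =====
theorem rerank_chunks_by_keywords_spec : Claim_equal_rerank_chunks_by_keywords := by
  intro chunks question top_k _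
  unfold Spec_rerank_chunks_by_keywords
  exact pv_main chunks question top_k
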